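-- pv_equiv track=rewrite | github.com/randomRedMage/random_red_mage_py_solitaire | src/solitaire/modes/bowling_solitaire.py | _pins_form_connected_group
-- ===== SOURCE A (Python) =====
-- from typing import Any, Dict, Iterable, Iterator, List, Mapping, Optional, Sequence, Set, Tuple
--
-- PIN_ADJACENCY: Dict[int, Set[int]] = {
--     0: {1, 4},
--     1: {0, 2, 4, 5},
--     2: {1, 3, 5, 6},
--     3: {2, 6},
--     4: {0, 1, 5, 7},
--     5: {1, 2, 4, 6, 7, 8},
--     6: {2, 3, 5, 8},
--     7: {4, 5, 8, 9},
--     8: {5, 6, 7, 9},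
--     9: {7, 8},
-- }
--
-- def _pins_form_connected_group(indices: Sequence[int]) -> bool:
--     if not indices:
--         return False
--     visited = set()
--     to_visit = [indices[0]]
--     target = set(indices)
--     while to_visit:
--         current = to_visit.pop()
--         if current in visited:
--             continue
--         visited.add(current)
--         for neighbor in PIN_ADJACENCY.get(current, set()):
--             if neighbor in target and neighbor not in visited:
--                 to_visit.append(neighbor)
--     return visited == target
-- ===== SOURCE B (Python) =====
-- from typing import Any, Dict, Iterable, Iterator, List, Mapping, Optional, Sequence, Set, Tuple
--
-- PIN_ADJACENCY: Dict[int, Set[int]] = {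
--     0: {1, 4},
--     1: {0, 2, 4, 5},
--     2: {1, 3, 5, 6},
--     3: {2, 6},
--     4: {0, 1, 5, 7},
--     5: {1, 2, 4, 6, 7, 8},
--     6: {2, 3, 5, 8},
--     7: {4, 5, 8, 9},
--     8: {5, 6, 7, 9},
--     9: {7, 8},
-- }
--
-- def _pins_form_connected_group(indices):
--     if not indices:
--         return False
--     target = set(indices)
--     comp = {indices[0]}
--     for _ in range(len(target)):
--         comp = comp | {n for u in comp
--                        for n in PIN_ADJACENCY.get(u, set())
--                        if n in target}
--     return comp == target
-- ===== Notes on version B (the rewrite author's own statement) =====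
-- stated objective: simpler
-- what changed: Replaced the explicit-stack DFS with visited bookkeeping by a round-based closure: starting from a singleton component holding the first pin, len(target) whole-set saturation sweeps each add every in-target neighbor of the current component, then the component is compared with target.
import Mathlib
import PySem

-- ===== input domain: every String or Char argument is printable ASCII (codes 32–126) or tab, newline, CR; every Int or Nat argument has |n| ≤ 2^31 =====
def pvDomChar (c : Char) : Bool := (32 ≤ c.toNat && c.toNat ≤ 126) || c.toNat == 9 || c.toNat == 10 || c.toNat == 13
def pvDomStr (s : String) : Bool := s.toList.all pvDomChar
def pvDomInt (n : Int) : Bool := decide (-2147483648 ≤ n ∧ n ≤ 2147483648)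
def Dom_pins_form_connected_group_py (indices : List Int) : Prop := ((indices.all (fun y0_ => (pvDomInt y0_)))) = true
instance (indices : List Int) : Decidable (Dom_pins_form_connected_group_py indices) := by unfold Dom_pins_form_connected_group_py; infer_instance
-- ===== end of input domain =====

-- B replaces A's explicit-stack DFS by round-based set saturation (simpler data flow, no stack/visited bookkeeping); same return value.

-- ===== PORT A =====
-- the module constant PIN_ADJACENCY (shared by A and B, as in the Python module)
def pinAdjacency : PySem.Dict Int (PySem.Set Int) :=
  PySem.Dict.ofList
    [((0:Int), PySem.Set.ofList [1,4]), (1, PySem.Set.ofList [0,2,4,5]),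
     (2, PySem.Set.ofList [1,3,5,6]), (3, PySem.Set.ofList [2,6]),
     (4, PySem.Set.ofList [0,1,5,7]), (5, PySem.Set.ofList [1,2,4,6,7,8]),
     (6, PySem.Set.ofList [2,3,5,8]), (7, PySem.Set.ofList [4,5,8,9]),
     (8, PySem.Set.ofList [5,6,7,9]), (9, PySem.Set.ofList [7,8])]

-- termination helper for dfsA: every adjacency list of the fixed dict has at most 6 entries
theorem adj_len_le (u : Int) : (PySem.Dict.getD pinAdjacency u PySem.Set.empty).length ≤ 6 := by
  unfold PySem.Dict.getD
  cases hfind : pinAdjacency.get? u with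
  | none => simp [PySem.Set.empty]
  | some v =>
    simp only [PySem.Dict.get?] at hfind
    rcases Option.map_eq_some_iff.mp hfind with ⟨p, hp, hpv⟩
    have hmem : p ∈ pinAdjacency.items := List.mem_of_find?_eq_some hp
    have hit : pinAdjacency.items =
      [((0:Int), [1,4]), (1, [0,2,4,5]),
       (2, [1,3,5,6]), (3, [2,6]),
       (4, [0,1,5,7]), (5, [1,2,4,6,7,8]),
       (6, [2,3,5,8]), (7, [4,5,8,9]),
       (8, [5,6,7,9]), (9, [7,8])] := by decide
    rw [hit] at hmem
    subst hpv
    simp only [List.mem_cons, List.not_mem_nil, or_false] at hmem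
    rcases hmem with h|h|h|h|h|h|h|h|h|h <;> rw [h] <;> decide

-- termination lemmas for dfsA's measure (stated separately to keep dfsA's body small)
theorem dfsA_dec1 (t vis tv : List Int) (h : ¬ tv = []) :
    7 * ((t ++ tv.dropLast).toFinset.filter (fun x => x ∉ vis)).card + tv.dropLast.length <
    7 * ((t ++ tv).toFinset.filter (fun x => x ∉ vis)).card + tv.length := by
  have hsub : ((t ++ tv.dropLast).toFinset.filter (fun x => x ∉ vis)) ⊆
      ((t ++ tv).toFinset.filter (fun x => x ∉ vis)) := by
    intro x hx
    simp only [Finset.mem_filter, List.mem_toFinset, List.mem_append] at hx ⊢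
    exact ⟨hx.1.imp id (fun hx' => (List.dropLast_sublist tv).subset hx'), hx.2⟩
  have hcard := Finset.card_le_card hsub
  have hlen : tv.dropLast.length + 1 = tv.length := by
    rw [List.length_dropLast]
    have : tv.length ≠ 0 := fun h0 => h (List.length_eq_zero_iff.mp h0)
    omega
  omega

theorem dfsA_dec2 (t vis tv : List Int) (h : ¬ tv = [])
    (hcur : ¬ PySem.Set.contains vis (tv.getLast h) = true) :
    7 * ((t ++ (tv.dropLast ++ (PySem.Dict.getD pinAdjacency (tv.getLast h) PySem.Set.empty).filter
        (fun n => PySem.Set.contains t n && !(PySem.Set.contains (PySem.Set.add vis (tv.getLast h)) n)))).toFinset.filter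
        (fun x => x ∉ PySem.Set.add vis (tv.getLast h))).card +
      (tv.dropLast ++ (PySem.Dict.getD pinAdjacency (tv.getLast h) PySem.Set.empty).filter
        (fun n => PySem.Set.contains t n && !(PySem.Set.contains (PySem.Set.add vis (tv.getLast h)) n))).length <
    7 * ((t ++ tv).toFinset.filter (fun x => x ∉ vis)).card + tv.length := by
  have hnv : tv.getLast h ∉ vis := fun hmem =>
    hcur ((PySem.Set.contains_iff vis (tv.getLast h)).mpr hmem)
  have hsub : ((t ++ (tv.dropLast ++ (PySem.Dict.getD pinAdjacency (tv.getLast h) PySem.Set.empty).filter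
        (fun n => PySem.Set.contains t n && !(PySem.Set.contains (PySem.Set.add vis (tv.getLast h)) n)))).toFinset.filter
        (fun x => x ∉ PySem.Set.add vis (tv.getLast h))) ⊂
      ((t ++ tv).toFinset.filter (fun x => x ∉ vis)) := by
    rw [Finset.ssubset_iff_of_subset]
    · refine ⟨tv.getLast h, ?_, ?_⟩
      · simp only [Finset.mem_filter, List.mem_toFinset, List.mem_append]
        exact ⟨Or.inr (List.getLast_mem h), hnv⟩
      · simp only [Finset.mem_filter, List.mem_toFinset, not_and, not_not]
        intro _
        exact (PySem.Set.mem_add vis (tv.getLast h) (tv.getLast h)).mpr (Or.inr rfl)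
    · intro x hx
      simp only [Finset.mem_filter, List.mem_toFinset, List.mem_append, List.mem_filter] at hx ⊢
      obtain ⟨hloc, hnvis'⟩ := hx
      have hxvis : x ∉ vis := fun hxv =>
        hnvis' ((PySem.Set.mem_add vis (tv.getLast h) x).mpr (Or.inl hxv))
      refine ⟨?_, hxvis⟩
      rcases hloc with ht' | hrest | hn
      · exact Or.inl ht'
      · exact Or.inr ((List.dropLast_sublist tv).subset hrest)
      · have := hn.2
        simp only [Bool.and_eq_true] at this
        exact Or.inl ((PySem.Set.contains_iff t x).mp this.1)
  have hcard := Finset.card_lt_card hsub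
  have hlen : tv.dropLast.length + 1 = tv.length := by
    rw [List.length_dropLast]
    have : tv.length ≠ 0 := fun h0 => h (List.length_eq_zero_iff.mp h0)
    omega
  have hnlen : ((PySem.Dict.getD pinAdjacency (tv.getLast h) PySem.Set.empty).filter
      (fun n => PySem.Set.contains t n && !(PySem.Set.contains (PySem.Set.add vis (tv.getLast h)) n))).length ≤ 6 :=
    le_trans (List.length_filter_le _ _) (adj_len_le (tv.getLast h))
  simp only [List.length_append]
  omega

-- A's while loop: pop from the end of to_visit, mark visited, push unvisited in-target neighbors
def dfsA (t vis tv : List Int) : List Int :=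
  if h : tv = [] then vis
  else
    let current := tv.getLast h
    let rest := tv.dropLast
    if PySem.Set.contains vis current then dfsA t vis rest
    else
      let vis' := PySem.Set.add vis current
      let nbrs := (PySem.Dict.getD pinAdjacency current PySem.Set.empty).filter
                    (fun n => PySem.Set.contains t n && !(PySem.Set.contains vis' n))
      dfsA t vis' (rest ++ nbrs)
termination_by 7 * ((t ++ tv).toFinset.filter (fun x => x ∉ vis)).card + tv.length
decreasing_by
  · exact dfsA_dec1 t vis tv h
  · exact dfsA_dec2 t vis tv h (by assumption)

def pins_form_connected_group_py (indices : List Int) : Bool :=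
  match indices with
  | [] => false
  | i0 :: _ =>
    let target := PySem.Set.ofList indices
    PySem.Set.equal (dfsA target PySem.Set.empty [i0]) target

-- ===== PORT B =====
-- one saturation sweep: comp | {n for u in comp for n in PIN_ADJACENCY.get(u, set()) if n in target}
def stepB (t c : List Int) : List Int :=
  PySem.Set.union c (PySem.Set.ofList (c.flatMap (fun u =>
    (PySem.Dict.getD pinAdjacency u PySem.Set.empty).filter (fun n => PySem.Set.contains t n))))

def pins_form_connected_group_py_alt (indices : List Int) : Bool :=
  match indices with
  | [] => false
  | i0 :: _ =>
    let target := PySem.Set.ofList indices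
    let comp := (List.range target.length).foldl (fun c _ => stepB target c) (PySem.Set.ofList [i0])
    PySem.Set.equal comp target

-- ===== PRECONDITION & SPEC =====
def Spec_pins_form_connected_group_py (indices : List Int) (out : Bool) : Prop := out = pins_form_connected_group_py_alt indices
instance (indices : List Int) (out : Bool) : Decidable (Spec_pins_form_connected_group_py indices out) := by unfold Spec_pins_form_connected_group_py; infer_instance

-- ===== CLAIM (what is proved, stated in full; the proofs are below) =====
def Claim_equal_pins_form_connected_group_py : Prop := ∀ (indices : List Int), Dom_pins_form_connected_group_py indices → Spec_pins_form_connected_group_py indices (pins_form_connected_group_py indices)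

-- ===== LEMMAS AND PROOFS =====

theorem bool_eq_of_iff {a b : Bool} (h : a = true ↔ b = true) : a = b := by
  cases a <;> cases b <;> simp_all

-- closedness under taking in-target neighbors: the property both algorithms saturate to
def ClosedIn (t S : List Int) : Prop :=
  ∀ u ∈ S, ∀ v ∈ PySem.Dict.getD pinAdjacency u PySem.Set.empty, v ∈ t → v ∈ S

theorem mem_stepB (t c : List Int) (x : Int) :
    x ∈ stepB t c ↔ x ∈ c ∨ ∃ u ∈ c, x ∈ PySem.Dict.getD pinAdjacency u PySem.Set.empty ∧ x ∈ t := by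
  simp only [stepB, PySem.Set.mem_union, PySem.Set.mem_ofList, List.mem_flatMap, List.mem_filter,
    PySem.Set.contains_iff]

theorem dfsA_superset (t vis tv : List Int) :
    ∀ x, x ∈ vis ∨ x ∈ tv → x ∈ dfsA t vis tv := by
  refine dfsA.induct t (fun vis tv => ∀ x, x ∈ vis ∨ x ∈ tv → x ∈ dfsA t vis tv) ?_ ?_ ?_ vis tv
  · intro vis x hx
    rw [dfsA, dif_pos rfl]
    simpa using hx
  · intro vis tv h current rest hcur ih x hx
    have hc : PySem.Set.contains vis (tv.getLast h) = true := hcur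
    rw [dfsA, dif_neg h, if_pos hc]
    apply ih
    rcases hx with hv | htv
    · exact Or.inl hv
    · rcases List.mem_append.mp (by rwa [← List.dropLast_append_getLast h] at htv) with hr | hl
      · exact Or.inr hr
      · refine Or.inl ?_
        have hx' : x = tv.getLast h := by simpa using hl
        rw [hx']
        exact (PySem.Set.contains_iff vis _).mp hc
  · intro vis tv h current rest hcur vis' nbrs ih x hx
    have hc : ¬ (PySem.Set.contains vis (tv.getLast h) = true) := hcur
    rw [dfsA, dif_neg h, if_neg hc]
    apply ih
    rcases hx with hv | htv
    · exact Or.inl ((PySem.Set.mem_add vis (tv.getLast h) x).mpr (Or.inl hv))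
    · rcases List.mem_append.mp (by rwa [← List.dropLast_append_getLast h] at htv) with hr | hl
      · exact Or.inr (List.mem_append.mpr (Or.inl hr))
      · exact Or.inl ((PySem.Set.mem_add vis (tv.getLast h) x).mpr (Or.inr (by simpa using hl)))

theorem dfsA_closed (t vis tv : List Int) :
    (∀ u ∈ vis, ∀ v ∈ PySem.Dict.getD pinAdjacency u PySem.Set.empty, v ∈ t → v ∈ vis ∨ v ∈ tv) →
    ClosedIn t (dfsA t vis tv) := by
  refine dfsA.induct t (fun vis tv =>
    (∀ u ∈ vis, ∀ v ∈ PySem.Dict.getD pinAdjacency u PySem.Set.empty, v ∈ t → v ∈ vis ∨ v ∈ tv) →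
    ClosedIn t (dfsA t vis tv)) ?_ ?_ ?_ vis tv
  · intro vis hinv
    rw [dfsA, dif_pos rfl]
    intro u hu v hv hvt
    rcases hinv u hu v hv hvt with h' | h'
    · exact h'
    · simp at h'
  · intro vis tv h current rest hcur ih hinv
    have hc : PySem.Set.contains vis (tv.getLast h) = true := hcur
    rw [dfsA, dif_neg h, if_pos hc]
    apply ih
    intro u hu v hv hvt
    rcases hinv u hu v hv hvt with h' | h'
    · exact Or.inl h'
    · rcases List.mem_append.mp (by rwa [← List.dropLast_append_getLast h] at h') with hr | hl
      · exact Or.inr hr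
      · refine Or.inl ?_
        have hv' : v = tv.getLast h := by simpa using hl
        rw [hv']
        exact (PySem.Set.contains_iff vis _).mp hc
  · intro vis tv h current rest hcur vis' nbrs ih hinv
    have hc : ¬ (PySem.Set.contains vis (tv.getLast h) = true) := hcur
    rw [dfsA, dif_neg h, if_neg hc]
    apply ih
    intro u hu v hv hvt
    rcases (PySem.Set.mem_add vis (tv.getLast h) u).mp hu with hu' | hu'
    · rcases hinv u hu' v hv hvt with h' | h'
      · exact Or.inl ((PySem.Set.mem_add _ _ v).mpr (Or.inl h'))
      · rcases List.mem_append.mp (by rwa [← List.dropLast_append_getLast h] at h') with hr | hl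
        · exact Or.inr (List.mem_append.mpr (Or.inl hr))
        · exact Or.inl ((PySem.Set.mem_add _ _ v).mpr (Or.inr (by simpa using hl)))
    · subst hu'
      by_cases hvv : v ∈ PySem.Set.add vis (tv.getLast h)
      · exact Or.inl hvv
      · refine Or.inr (List.mem_append.mpr (Or.inr ?_))
        rw [List.mem_filter]
        refine ⟨hv, ?_⟩
        simp only [Bool.and_eq_true]
        refine ⟨(PySem.Set.contains_iff t v).mpr hvt, ?_⟩
        show (!PySem.Set.contains (PySem.Set.add vis (tv.getLast h)) v) = true
        cases hb : PySem.Set.contains (PySem.Set.add vis (tv.getLast h)) v with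
        | false => rfl
        | true => exact absurd ((PySem.Set.contains_iff _ v).mp hb) hvv

theorem dfsA_minimal (t S : List Int) (hS : ClosedIn t S) :
    ∀ (vis tv : List Int), (∀ x ∈ vis, x ∈ S) → (∀ x ∈ tv, x ∈ S) →
    ∀ x ∈ dfsA t vis tv, x ∈ S := by
  intro vis0 tv0
  refine dfsA.induct t (fun vis tv => (∀ x ∈ vis, x ∈ S) → (∀ x ∈ tv, x ∈ S) →
    ∀ x ∈ dfsA t vis tv, x ∈ S) ?_ ?_ ?_ vis0 tv0
  · intro vis hvis _
    rw [dfsA, dif_pos rfl]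
    exact hvis
  · intro vis tv h current rest hcur ih hvis htv
    have hc : PySem.Set.contains vis (tv.getLast h) = true := hcur
    rw [dfsA, dif_neg h, if_pos hc]
    exact ih hvis (fun x hx => htv x ((List.dropLast_sublist tv).subset hx))
  · intro vis tv h current rest hcur vis' nbrs ih hvis htv
    have hc : ¬ (PySem.Set.contains vis (tv.getLast h) = true) := hcur
    rw [dfsA, dif_neg h, if_neg hc]
    apply ih
    · intro x hx
      rcases (PySem.Set.mem_add vis (tv.getLast h) x).mp hx with hx' | hx'
      · exact hvis x hx'
      · exact hx' ▸ htv _ (List.getLast_mem h)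
    · intro x hx
      rcases List.mem_append.mp hx with hr | hn
      · exact htv x ((List.dropLast_sublist tv).subset hr)
      · have hm := List.mem_filter.mp hn
        have hpred := hm.2
        simp only [Bool.and_eq_true] at hpred
        exact hS _ (htv _ (List.getLast_mem h)) x hm.1 ((PySem.Set.contains_iff t x).mp hpred.1)

theorem foldl_range_succ (f : List Int → Nat → List Int) (c : List Int) (n : Nat) :
    (List.range (n+1)).foldl f c = f ((List.range n).foldl f c) n := by
  simp [List.range_succ]

theorem iterB_superset (t c : List Int) (n : Nat) :
    ∀ x ∈ c, x ∈ (List.range n).foldl (fun c _ => stepB t c) c := by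
  induction n with
  | zero => simp
  | succ n ih =>
    rw [foldl_range_succ]
    intro x hx
    exact (mem_stepB t _ x).mpr (Or.inl (ih x hx))

theorem iterB_minimal (t c : List Int) (n : Nat) (S : List Int)
    (hc : ∀ x ∈ c, x ∈ S) (hS : ClosedIn t S) :
    ∀ x ∈ (List.range n).foldl (fun c _ => stepB t c) c, x ∈ S := by
  induction n with
  | zero => simpa using hc
  | succ n ih =>
    rw [foldl_range_succ]
    intro x hx
    rcases (mem_stepB t _ x).mp hx with hx' | ⟨u, hu, hadj, hxt⟩
    · exact ih x hx'
    · exact hS u (ih u hu) x hadj hxt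

-- the saturation sweep on the Finset of members (membership image of stepB)
def gStep (T : Finset Int) (A : Finset Int) : Finset Int :=
  A ∪ T.filter (fun x => ∃ u ∈ A, x ∈ PySem.Dict.getD pinAdjacency u PySem.Set.empty)

theorem toFinset_stepB (t c : List Int) :
    (stepB t c).toFinset = gStep t.toFinset c.toFinset := by
  ext x
  simp only [List.mem_toFinset, mem_stepB, gStep, Finset.mem_union, Finset.mem_filter,
    List.mem_toFinset]
  tauto

theorem iter_toFinset (t c : List Int) (n : Nat) :
    ((List.range n).foldl (fun c _ => stepB t c) c).toFinset = (gStep t.toFinset)^[n] c.toFinset := by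
  induction n with
  | zero => rfl
  | succ n ih => rw [foldl_range_succ, Function.iterate_succ_apply', toFinset_stepB, ih]

theorem gStep_infl (T A : Finset Int) : A ⊆ gStep T A := Finset.subset_union_left

theorem gStep_bnd (T A : Finset Int) (hA : A ⊆ T) : gStep T A ⊆ T :=
  Finset.union_subset hA (Finset.filter_subset _ _)

theorem iter_reaches_fix (T A : Finset Int) (hA : A ⊆ T) (hne : A.Nonempty) :
    gStep T ((gStep T)^[T.card] A) = (gStep T)^[T.card] A := by
  by_cases hex : ∃ k < T.card, gStep T ((gStep T)^[k] A) = (gStep T)^[k] A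
  · obtain ⟨k, hk, hfix⟩ := hex
    have hall : ∀ m, (gStep T)^[k + m] A = (gStep T)^[k] A := by
      intro m
      rw [Nat.add_comm, Function.iterate_add_apply]
      exact Function.iterate_fixed hfix m
    have hNk : (gStep T)^[T.card] A = (gStep T)^[k] A := by
      have := hall (T.card - k)
      rwa [Nat.add_sub_cancel' (le_of_lt hk)] at this
    rw [hNk]
    exact hfix
  · exfalso
    push Not at hex
    have hsubT : ∀ k, (gStep T)^[k] A ⊆ T := by
      intro k
      induction k with
      | zero => simpa
      | succ k ih => rw [Function.iterate_succ_apply']; exact gStep_bnd T _ ih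
    have hgrow : ∀ k, k ≤ T.card → k + A.card ≤ ((gStep T)^[k] A).card := by
      intro k
      induction k with
      | zero => simp
      | succ k ih =>
        intro hk1
        have hlt : (gStep T)^[k] A ⊂ gStep T ((gStep T)^[k] A) :=
          Finset.ssubset_iff_subset_ne.mpr ⟨gStep_infl T _, fun he => hex k (by omega) he.symm⟩
        have hcard := Finset.card_lt_card hlt
        rw [Function.iterate_succ_apply']
        have := ih (by omega)
        omega
    have h1 := hgrow T.card le_rfl
    have h2 := Finset.card_le_card (hsubT T.card)
    have h3 : 1 ≤ A.card := Finset.card_pos.mpr hne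
    omega

theorem iterB_closed (t : List Int) (i0 : Int) (ht : t.Nodup) (hi0 : i0 ∈ t) :
    ClosedIn t ((List.range t.length).foldl (fun c _ => stepB t c) (PySem.Set.ofList [i0])) := by
  have hcardT : t.toFinset.card = t.length := List.toFinset_card_of_nodup ht
  have hAsub : (PySem.Set.ofList [i0]).toFinset ⊆ t.toFinset := by
    intro x hx
    simp only [List.mem_toFinset, PySem.Set.mem_ofList, List.mem_singleton] at hx
    simpa [List.mem_toFinset, hx] using hi0
  have hAne : (PySem.Set.ofList [i0]).toFinset.Nonempty :=
    ⟨i0, by simp [List.mem_toFinset, PySem.Set.mem_ofList]⟩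
  have hfix := iter_reaches_fix t.toFinset (PySem.Set.ofList [i0]).toFinset hAsub hAne
  intro u hu v hv hvt
  have hCfin := iter_toFinset t (PySem.Set.ofList [i0]) t.length
  rw [hcardT] at hfix
  have hvin : v ∈ gStep t.toFinset (((List.range t.length).foldl (fun c _ => stepB t c) (PySem.Set.ofList [i0])).toFinset) := by
    apply Finset.mem_union_right
    rw [Finset.mem_filter]
    exact ⟨List.mem_toFinset.mpr hvt, u, List.mem_toFinset.mpr hu, hv⟩
  rw [hCfin, hfix, ← hCfin] at hvin
  exact List.mem_toFinset.mp hvin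

-- ===== VERDICT (by name: the statement is the Claim_ definition above) =====
theorem pins_form_connected_group_py_spec : Claim_equal_pins_form_connected_group_py := by
  intro indices _
  unfold Spec_pins_form_connected_group_py
  cases indices with
  | nil => rfl
  | cons i0 tl =>
    simp only [pins_form_connected_group_py, pins_form_connected_group_py_alt]
    have hi0 : i0 ∈ PySem.Set.ofList (i0 :: tl) :=
      (PySem.Set.mem_ofList _ _).mpr (List.mem_cons_self)
    have htnd : (PySem.Set.ofList (i0 :: tl) : List Int).Nodup := PySem.Set.nodup_ofList _
    have hCclosed := iterB_closed (PySem.Set.ofList (i0 :: tl)) i0 htnd hi0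
    have hVclosed : ClosedIn (PySem.Set.ofList (i0 :: tl))
        (dfsA (PySem.Set.ofList (i0 :: tl)) PySem.Set.empty [i0]) :=
      dfsA_closed _ _ _ (by intro u hu; simp [PySem.Set.empty] at hu)
    have hVC : ∀ x : Int, x ∈ dfsA (PySem.Set.ofList (i0 :: tl)) PySem.Set.empty [i0] ↔
        x ∈ (List.range (PySem.Set.ofList (i0 :: tl)).length).foldl
          (fun c _ => stepB (PySem.Set.ofList (i0 :: tl)) c) (PySem.Set.ofList [i0]) := by
      intro x
      constructor
      · intro hx
        refine dfsA_minimal _ _ hCclosed _ _ ?_ ?_ x hx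
        · intro y hy; simp [PySem.Set.empty] at hy
        · intro y hy
          have : y = i0 := by simpa using hy
          subst this
          exact iterB_superset _ _ _ y (by simp [PySem.Set.mem_ofList])
      · intro hx
        refine iterB_minimal _ _ _ _ ?_ hVclosed x hx
        intro y hy
        have : y = i0 := by simpa [PySem.Set.mem_ofList] using hy
        subst this
        exact dfsA_superset _ _ _ y (Or.inr (by simp))
    have hiff : (PySem.Set.equal (dfsA (PySem.Set.ofList (i0 :: tl)) PySem.Set.empty [i0])
          (PySem.Set.ofList (i0 :: tl)) = true) ↔
        (PySem.Set.equal ((List.range (PySem.Set.ofList (i0 :: tl)).length).foldl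
          (fun c _ => stepB (PySem.Set.ofList (i0 :: tl)) c) (PySem.Set.ofList [i0]))
          (PySem.Set.ofList (i0 :: tl)) = true) := by
      rw [PySem.Set.equal_iff, PySem.Set.equal_iff]
      constructor
      · intro hE x; rw [← hVC x]; exact hE x
      · intro hE x; rw [hVC x]; exact hE x
    exact bool_eq_of_iff hiff
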